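-- pv_equiv track=rewrite | github.com/Jayant296/Jayant-DSA | week21/heaps1/product_of_3.py | solve
-- ===== SOURCE A (Python) =====
-- def solve(A):
--     # creating min a heap of size 3
--     def percolate_down(curr):
--         left = 1
--         right = 2
--         if A[curr] > prod[0]:
--             prod[0] = A[curr]
--         if prod[left] < prod[0] or prod[right] < prod[0]:
--             if prod[left] < prod[right]:
--                 prod[left], prod[0] = prod[0], prod[left]
--             else:
--                 prod[right], prod[0] = prod[0], prod[right]
--         return prod[0]*prod[1]*prod[2]
--
--     first = min(A[0], A[1])
--     second = A[0] if first == A[1] else A[1]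
--     prod = [first, second]
--     if first > A[2]:
--         prod.append(first)
--         prod[0] = A[2]
--     else:
--         prod.append(A[2])
--     ans = [-1, -1, A[0]*A[1]*A[2]]
--     if len(A) <= 3:
--         return ans
--     for i in range(3, len(A)):
--         ans.append(percolate_down(i))
--     return ans
-- ===== SOURCE B (Python) =====
-- def solve(A):
--     ans = [-1, -1, A[0] * A[1] * A[2]]
--     for i in range(3, len(A)):
--         x, y, z = sorted(A[:i + 1])[-3:]
--         ans.append(x * y * z)
--     return ans
-- ===== Notes on version B (the rewrite author's own statement) =====
-- stated objective: simpler
-- what changed: replaces the incremental size-3 min-heap percolation with recomputing the three largest of each prefix directly by sorting the prefix and taking its last three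
import Mathlib
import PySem

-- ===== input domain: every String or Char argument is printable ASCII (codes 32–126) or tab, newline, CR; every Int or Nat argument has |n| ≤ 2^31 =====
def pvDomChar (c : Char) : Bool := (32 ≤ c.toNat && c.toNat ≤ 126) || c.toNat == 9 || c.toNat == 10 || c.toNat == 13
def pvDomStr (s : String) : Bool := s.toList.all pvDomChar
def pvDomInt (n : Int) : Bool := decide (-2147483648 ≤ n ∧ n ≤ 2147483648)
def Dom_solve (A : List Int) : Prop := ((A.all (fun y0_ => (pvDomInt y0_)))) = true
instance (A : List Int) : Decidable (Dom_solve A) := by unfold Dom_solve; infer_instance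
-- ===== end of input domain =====

-- B replaces A's incremental size-3 min-heap percolation by re-sorting each prefix and
-- taking its three largest (simpler, not faster); equal output wherever A returns (length ≥ 3).

-- ===== PORT A =====
-- percolate_down's body on the heap state (prod[0], prod[1], prod[2]); A[curr] is passed in as `a`
def pvStepA (a : Int) (p : Int × Int × Int) : Int × Int × Int :=
  let p0 := if a > p.1 then a else p.1
  if p.2.1 < p0 ∨ p.2.2 < p0 then
    if p.2.1 < p.2.2 then (p.2.1, p0, p.2.2) else (p.2.2, p.2.1, p0)
  else (p0, p.2.1, p.2.2)

-- the for-loop: state = (prod heap, ans); each step percolates A[i] and appends the product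
def pvLoopA (A : List Int) (is : List Int) (st : (Int × Int × Int) × List Int) :
    (Int × Int × Int) × List Int :=
  is.foldl (fun st i =>
    let p := pvStepA (PySem.List.pyGetD A i 0) st.1
    (p, st.2 ++ [p.1 * p.2.1 * p.2.2])) st

def solve (A : List Int) : List Int :=
  -- A indexes A[0], A[1], A[2] unconditionally (IndexError for length < 3, excluded by Pre_),
  -- so the `getD 0` defaults below are never reached on Pre_
  let a0 := PySem.List.pyGetD A 0 0
  let a1 := PySem.List.pyGetD A 1 0
  let a2 := PySem.List.pyGetD A 2 0
  let first := min a0 a1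
  let second := if first = a1 then a0 else a1
  let prod : Int × Int × Int :=
    if first > a2 then (a2, second, first) else (first, second, a2)
  let ans : List Int := [-1, -1, a0 * a1 * a2]
  if A.length ≤ 3 then ans
  else (pvLoopA A (PySem.List.pyRange 3 (A.length : Int) 1) (prod, ans)).2

-- ===== PORT B =====
-- product of sorted(P)[-3:] (B's loop body on the prefix P = A[:i+1]); the `_ => 0` arm is
-- unreachable for prefixes of length ≥ 3
def pvLargest3Prod (P : List Int) : Int :=
  match PySem.List.slice (PySem.List.sorted P (fun v => v) false) (some (-3)) none with
  | [x, y, z] => x * y * z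
  | _ => 0

def solve_alt (A : List Int) : List Int :=
  let a0 := PySem.List.pyGetD A 0 0
  let a1 := PySem.List.pyGetD A 1 0
  let a2 := PySem.List.pyGetD A 2 0
  [-1, -1, a0 * a1 * a2] ++
    (PySem.List.pyRange 3 (A.length : Int) 1).map
      (fun i => pvLargest3Prod (PySem.List.slice A none (some (i + 1))))

-- ===== PRECONDITION & SPEC =====
-- A raises IndexError (A[2]) when len(A) < 3; B raises there too
def Pre_solve (A : List Int) : Prop := 3 ≤ A.length
instance (A : List Int) : Decidable (Pre_solve A) := by unfold Pre_solve; infer_instance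
def pvWitness_solve : List Int := ([1, 2, 3, 4])

def Spec_solve (A : List Int) (out : List Int) : Prop := out = solve_alt A
instance (A : List Int) (out : List Int) : Decidable (Spec_solve A out) := by unfold Spec_solve; infer_instance

-- ===== CLAIM (what is proved, stated in full; the proofs are below) =====
def Claim_equal_solve : Prop := ∀ (A : List Int), Dom_solve A → Pre_solve A → Spec_solve A (solve A)

-- ===== LEMMAS AND PROOFS =====

-- the coupling invariant: the heap triple holds the three largest of the prefix l, min at the root
def pvInv (l : List Int) (p : Int × Int × Int) : Prop :=
  p.1 ≤ p.2.1 ∧ p.1 ≤ p.2.2 ∧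
    ∃ r, l.Perm (r ++ [p.1, p.2.1, p.2.2]) ∧ ∀ w ∈ r, w ≤ p.1

lemma pv_sorted_decomp (L r : List Int) (x y z : Int)
    (hp : L.Perm (r ++ [x, y, z])) (hr : ∀ w ∈ r, w ≤ x) (hxy : x ≤ y) (hyz : y ≤ z) :
    PySem.List.sorted L (fun v => v) false =
      PySem.List.sorted r (fun v => v) false ++ [x, y, z] := by
  apply PySem.List.sorted_id_eq_of_perm_of_pairwise
  · exact ((PySem.List.sorted_perm r (fun v => v) false).append_right _).trans hp.symm
  · refine List.pairwise_append.mpr ⟨?_, ?_, ?_⟩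
    · exact PySem.List.sorted_pairwise r (fun v => v)
    · simp only [List.pairwise_cons, List.mem_cons]
      constructor
      · rintro b (rfl | rfl | h) <;> first | omega | simp_all
      · constructor
        · rintro b (rfl | h) <;> first | omega | simp_all
        · simp
    · intro a ha b hb
      rw [PySem.List.mem_sorted] at ha
      have h1 : a ≤ x := hr a ha
      simp only [List.mem_cons] at hb
      rcases hb with rfl | rfl | rfl | h <;> first | omega | simp_all

lemma pv_prod_of_inv (P : List Int) (q : Int × Int × Int) (h : pvInv P q) :
    pvLargest3Prod P = q.1 * q.2.1 * q.2.2 := by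
  obtain ⟨h1, h2, r, hperm, hr⟩ := h
  rcases le_total q.2.1 q.2.2 with hle | hle
  · have hdec := pv_sorted_decomp P r q.1 q.2.1 q.2.2 hperm hr h1 hle
    unfold pvLargest3Prod
    rw [hdec, PySem.List.slice_from_neg_ofNat _ 3 (by omega)]
    have hlen : (PySem.List.sorted r (fun v => v) false ++ [q.1, q.2.1, q.2.2]).length
        = (PySem.List.sorted r (fun v => v) false).length + 3 := by simp
    rw [hlen, Nat.add_sub_cancel, List.drop_left]
  · have hperm' : P.Perm (r ++ [q.1, q.2.2, q.2.1]) := by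
      refine hperm.trans (List.Perm.append_left r ?_)
      exact .cons q.1 (List.Perm.swap q.2.2 q.2.1 [])
    have hdec := pv_sorted_decomp P r q.1 q.2.2 q.2.1 hperm' hr h2 hle
    unfold pvLargest3Prod
    rw [hdec, PySem.List.slice_from_neg_ofNat _ 3 (by omega)]
    have hlen : (PySem.List.sorted r (fun v => v) false ++ [q.1, q.2.2, q.2.1]).length
        = (PySem.List.sorted r (fun v => v) false).length + 3 := by simp
    rw [hlen, Nat.add_sub_cancel, List.drop_left]
    ring

lemma pv_step_inv (l : List Int) (a : Int) (p : Int × Int × Int) (h : pvInv l p) :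
    pvInv (l ++ [a]) (pvStepA a p) := by
  obtain ⟨p0, p1, p2⟩ := p
  obtain ⟨h1, h2, r, hperm, hr⟩ := h
  simp only at h1 h2 hperm hr
  have hcount := List.perm_iff_count.mp hperm
  unfold pvStepA
  dsimp only
  split_ifs with ha hc hlt hc hlt <;> simp only [pvInv] <;>
    [skip; skip; skip; (exfalso; omega); (exfalso; omega); skip]
  · -- a > p0, some child < a, p1 < p2 : new triple (p1, a, p2)
    refine ⟨by omega, by omega, r ++ [p0], ?_, ?_⟩
    · refine List.perm_iff_count.mpr fun x => ?_
      have := hcount x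
      simp only [List.count_append, List.count_cons, List.count_nil] at this ⊢
      split_ifs at this ⊢ <;> omega
    · intro w hw
      simp only [List.mem_append, List.mem_singleton] at hw
      rcases hw with hw | rfl
      · exact le_trans (hr w hw) (by omega)
      · omega
  · -- a > p0, some child < a, p2 ≤ p1 : new triple (p2, p1, a)
    refine ⟨by omega, by omega, r ++ [p0], ?_, ?_⟩
    · refine List.perm_iff_count.mpr fun x => ?_
      have := hcount x
      simp only [List.count_append, List.count_cons, List.count_nil] at this ⊢
      split_ifs at this ⊢ <;> omega
    · intro w hw
      simp only [List.mem_append, List.mem_singleton] at hw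
      rcases hw with hw | rfl
      · exact le_trans (hr w hw) (by omega)
      · omega
  · -- a > p0, both children ≥ a : new triple (a, p1, p2)
    refine ⟨by omega, by omega, r ++ [p0], ?_, ?_⟩
    · refine List.perm_iff_count.mpr fun x => ?_
      have := hcount x
      simp only [List.count_append, List.count_cons, List.count_nil] at this ⊢
      split_ifs at this ⊢ <;> omega
    · intro w hw
      simp only [List.mem_append, List.mem_singleton] at hw
      rcases hw with hw | rfl
      · exact le_trans (hr w hw) (by omega)
      · omega
  · -- a ≤ p0 : heap unchanged
    refine ⟨h1, h2, r ++ [a], ?_, ?_⟩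
    · refine List.perm_iff_count.mpr fun x => ?_
      have := hcount x
      simp only [List.count_append, List.count_cons, List.count_nil] at this ⊢
      split_ifs at this ⊢ <;> omega
    · intro w hw
      simp only [List.mem_append, List.mem_singleton] at hw
      rcases hw with hw | rfl
      · exact hr w hw
      · omega

lemma pv_loop_spec (A : List Int) (p0 : Int × Int × Int) (out0 : List Int)
    (h0 : pvInv (A.take 3) p0) :
    ∀ j : Nat, 3 ≤ j → j ≤ A.length →
      pvInv (A.take j) (pvLoopA A (PySem.List.pyRange 3 (j : Int) 1) (p0, out0)).1 ∧
      (pvLoopA A (PySem.List.pyRange 3 (j : Int) 1) (p0, out0)).2 =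
        out0 ++ (PySem.List.pyRange 3 (j : Int) 1).map
          (fun i => pvLargest3Prod (PySem.List.slice A none (some (i + 1)))) := by
  intro j hj
  induction j, hj using Nat.le_induction with
  | base =>
    intro _
    rw [PySem.List.pyRange_one_eq_nil (by norm_num)]
    simpa [pvLoopA] using h0
  | succ j hj3 ih =>
    intro hjlen
    have hjlen' : j < A.length := by omega
    have hsplit : PySem.List.pyRange 3 ((j + 1 : Nat) : Int) 1 =
        PySem.List.pyRange 3 (j : Int) 1 ++ [(j : Int)] := by
      push_cast
      exact PySem.List.pyRange_one_succ_right (by exact_mod_cast hj3)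
    obtain ⟨hinv, hout⟩ := ih (by omega)
    have hget : PySem.List.pyGetD A (j : Int) 0 = A[j] := by
      rw [PySem.List.pyGetD_natCast, List.getD_eq_getElem A 0 hjlen']
    have htake : A.take (j + 1) = A.take j ++ [A[j]] := by
      rw [List.take_add_one, List.getElem?_eq_getElem hjlen']
      rfl
    set st := pvLoopA A (PySem.List.pyRange 3 (j : Int) 1) (p0, out0) with hst
    have hloop : pvLoopA A (PySem.List.pyRange 3 ((j + 1 : Nat) : Int) 1) (p0, out0) =
        (pvStepA (PySem.List.pyGetD A (j : Int) 0) st.1,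
          st.2 ++ [(pvStepA (PySem.List.pyGetD A (j : Int) 0) st.1).1 *
            (pvStepA (PySem.List.pyGetD A (j : Int) 0) st.1).2.1 *
            (pvStepA (PySem.List.pyGetD A (j : Int) 0) st.1).2.2]) := by
      rw [hsplit]
      unfold pvLoopA
      rw [List.foldl_append]
      rfl
    have hinv' : pvInv (A.take (j + 1))
        (pvStepA (PySem.List.pyGetD A (j : Int) 0) st.1) := by
      rw [htake, hget]
      exact pv_step_inv _ _ _ hinv
    constructor
    · rw [hloop]; exact hinv'
    · rw [hloop, hsplit, List.map_append, hout, List.append_assoc]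
      have hslice : PySem.List.slice A none (some ((j : Int) + 1)) = A.take (j + 1) := by
        have hnat : ((j : Int) + 1).toNat = j + 1 := by omega
        rw [PySem.List.slice_to _ (by omega), hnat]
      simp only [List.map_cons, List.map_nil, hslice, pv_prod_of_inv _ _ hinv']

lemma pv_init_inv (a0 a1 a2 : Int) :
    pvInv [a0, a1, a2]
      (if min a0 a1 > a2
        then (a2, if min a0 a1 = a1 then a0 else a1, min a0 a1)
        else (min a0 a1, if min a0 a1 = a1 then a0 else a1, a2)) := by
  rcases le_total a0 a1 with h01 | h01
  · rw [min_eq_left h01]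
    split_ifs with hg hm hm <;> simp only [pvInv] <;>
      refine ⟨by omega, by omega, [], ?_, by simp⟩ <;>
      · refine List.perm_iff_count.mpr fun x => ?_
        simp only [List.count_cons, List.count_nil, List.nil_append, beq_iff_eq]
        all_goals (split_ifs <;> omega)
  · rw [min_eq_right h01]
    split_ifs with hg hm hm <;> simp only [pvInv] <;>
      refine ⟨by omega, by omega, [], ?_, by simp⟩ <;>
      · refine List.perm_iff_count.mpr fun x => ?_
        simp only [List.count_cons, List.count_nil, List.nil_append, beq_iff_eq]
        all_goals (split_ifs <;> omega)

-- ===== VERDICT (by name: the statement is the Claim_ definition above) =====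
theorem solve_spec : Claim_equal_solve := by
  intro A _ hpre
  unfold Pre_solve at hpre
  obtain ⟨a, b, c, t, rfl⟩ : ∃ a b c t, A = a :: b :: c :: t := by
    rcases A with _ | ⟨a, A⟩
    · simp at hpre
    rcases A with _ | ⟨b, A⟩
    · simp at hpre
    rcases A with _ | ⟨c, A⟩
    · simp at hpre
    exact ⟨a, b, c, A, rfl⟩
  unfold Spec_solve solve solve_alt
  dsimp only
  have e0 : PySem.List.pyGetD (a :: b :: c :: t) 0 0 = a := by
    rw [PySem.List.pyGetD_ofNat']; simp
  have e1 : PySem.List.pyGetD (a :: b :: c :: t) 1 0 = b := by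
    rw [PySem.List.pyGetD_ofNat']; simp
  have e2 : PySem.List.pyGetD (a :: b :: c :: t) 2 0 = c := by
    rw [PySem.List.pyGetD_ofNat']; simp
  rw [e0, e1, e2]
  have hinit : pvInv ((a :: b :: c :: t).take 3)
      (if min a b > c
        then (c, if min a b = b then a else b, min a b)
        else (min a b, if min a b = b then a else b, c)) := by
    have : (a :: b :: c :: t).take 3 = [a, b, c] := by simp
    rw [this]
    exact pv_init_inv a b c
  by_cases hlen : (a :: b :: c :: t).length ≤ 3
  · rw [if_pos hlen, PySem.List.pyRange_one_eq_nil (by exact_mod_cast hlen)]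
    simp
  · rw [if_neg hlen]
    exact (pv_loop_spec (a :: b :: c :: t) _ _ hinit (a :: b :: c :: t).length
      (by omega) le_rfl).2
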